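-- pv_equiv track=rewrite | github.com/GDonoghue0/AoC2024 | day3/solution3.py | handle_conditionals
-- ===== SOURCE A (Python) =====
-- def handle_conditionals(data):
--     do_str = "do()"
--     dont_str = "don't()"
--
--     data_copy = ""
--     enable = True
--     for i in range(len(data)-7):
--         if enable:
--             data_copy += data[i]
--         if data[i:i+4] == do_str:
--             enable = True
--         if data[i:i+7] == dont_str:
--             enable = False
--     return data_copy
-- ===== SOURCE B (Python) =====
-- def handle_conditionals(data):
--     # Jump-based scan: instead of stepping char by char, use str.find to jump
--     # between markers and copy whole enabled slices at once.
--     limit = len(data) - 7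
--     if limit <= 0:
--         return ""
--     out = ""
--     i = 0
--     enabled = True
--     while i < limit:
--         if enabled:
--             j = data.find("don't()", i)
--             if j == -1 or j >= limit:
--                 out += data[i:limit]
--                 break
--             out += data[i:j + 1]
--             i = j + 1
--             enabled = False
--         else:
--             j = data.find("do()", i)
--             if j == -1 or j >= limit:
--                 break
--             i = j + 1
--             enabled = True
--     return out
-- ===== Notes on version B (the rewrite author's own statement) =====
-- stated objective: faster
-- what changed: Replaces A's per-character state-machine loop (appending one char per index and re-testing both markers at every position) by a jump scan that uses str.find to locate the next relevant marker and copies each whole enabled interval as a single slice.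
import Mathlib
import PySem

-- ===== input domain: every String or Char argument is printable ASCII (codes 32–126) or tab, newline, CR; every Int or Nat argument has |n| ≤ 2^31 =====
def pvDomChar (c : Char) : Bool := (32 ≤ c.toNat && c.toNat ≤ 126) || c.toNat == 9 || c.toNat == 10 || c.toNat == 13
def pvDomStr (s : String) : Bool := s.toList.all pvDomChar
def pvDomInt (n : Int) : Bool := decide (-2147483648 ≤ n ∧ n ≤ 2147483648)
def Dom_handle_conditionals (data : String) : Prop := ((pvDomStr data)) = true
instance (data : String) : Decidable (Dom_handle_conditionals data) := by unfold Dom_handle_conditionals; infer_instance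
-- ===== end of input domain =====

-- B replaces A's per-character loop by str.find jumps that copy whole enabled slices at once (measured faster by a constant factor).

-- ===== PORT A =====
-- Loop body of A, one iteration at index i (data[i] is ported as pyGet?; the index is always in range here).
def hcStep (s : List Char) (st : List Char × Bool) (i : Int) : List Char × Bool :=
  let st := if st.2 then (st.1 ++ (PySem.List.pyGet? s i).toList, st.2) else st
  let st := if PySem.List.slice s (some i) (some (i + 4)) = "do()".toList then (st.1, true) else st
  if PySem.List.slice s (some i) (some (i + 7)) = "don't()".toList then (st.1, false) else st

def handle_conditionals (data : String) : String :=
  String.ofList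
    ((PySem.List.pyRange 0 ((data.toList.length : Int) - 7) 1).foldl
      (hcStep data.toList) ([], true)).1

-- ===== PORT B =====
-- The while loop of B; `hs` only supports termination (find's result is bounded by the string length).
def hcAltLoop (s : List Char) (limit : Nat) (hs : limit ≤ s.length) (i : Nat) (enabled : Bool)
    (out : List Char) : List Char :=
  if h : i < limit then
    if enabled then
      let j := PySem.Chars.findFrom s "don't()".toList (i : Int)
      if hj : j = -1 ∨ (limit : Int) ≤ j then
        out ++ PySem.List.slice s (some (i : Int)) (some (limit : Int))
      else
        hcAltLoop s limit hs (j.toNat + 1) false (out ++ PySem.List.slice s (some (i : Int)) (some (j + 1)))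
    else
      let j := PySem.Chars.findFrom s "do()".toList (i : Int)
      if hj : j = -1 ∨ (limit : Int) ≤ j then out
      else hcAltLoop s limit hs (j.toNat + 1) true out
  else out
termination_by limit - i
decreasing_by
  · push_neg at hj
    have := (PySem.Chars.findFrom_natCast_spec s "don't()".toList i (le_trans (Nat.le_of_lt h) hs) hj.1).1
    omega
  · push_neg at hj
    have := (PySem.Chars.findFrom_natCast_spec s "do()".toList i (le_trans (Nat.le_of_lt h) hs) hj.1).1
    omega

def handle_conditionals_alt (data : String) : String :=
  if (data.toList.length : Int) - 7 ≤ 0 then "" else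
    String.ofList
      (hcAltLoop data.toList ((data.toList.length : Int) - 7).toNat (by omega) 0 true [])

-- ===== PRECONDITION & SPEC =====
def Spec_handle_conditionals (data : String) (out : String) : Prop := out = handle_conditionals_alt data
instance (data : String) (out : String) : Decidable (Spec_handle_conditionals data out) := by unfold Spec_handle_conditionals; infer_instance

-- ===== CLAIM (what is proved, stated in full; the proofs are below) =====
def Claim_equal_handle_conditionals : Prop := ∀ (data : String), Dom_handle_conditionals data → Spec_handle_conditionals data (handle_conditionals data)

-- ===== LEMMAS AND PROOFS =====

-- A's loop, written as a recursion over the index (bridged to the foldl below).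
def hcARun (s : List Char) (limit : Nat) (i : Nat) (st : List Char × Bool) : List Char × Bool :=
  if i < limit then hcARun s limit (i + 1) (hcStep s st (i : Int)) else st
termination_by limit - i

theorem hcARun_stop (s : List Char) (limit i : Nat) (st : List Char × Bool) (h : limit ≤ i) :
    hcARun s limit i st = st := by
  unfold hcARun; simp [Nat.not_lt.mpr h]

theorem hcBridge (s : List Char) (limit : Nat) :
    ∀ fuel i st, limit - i ≤ fuel →
      (PySem.List.pyRange (i : Int) (limit : Int) 1).foldl (hcStep s) st = hcARun s limit i st := by
  intro fuel
  induction fuel with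
  | zero =>
      intro i st h
      rw [PySem.List.pyRange_one_eq_nil (by omega), hcARun_stop s limit i st (by omega)]
      rfl
  | succ n ih =>
      intro i st h
      by_cases hi : i < limit
      · rw [PySem.List.pyRange_one_cons (by exact_mod_cast hi)]
        unfold hcARun
        simp only [hi, if_pos]
        have : ((i : Int) + 1) = ((i + 1 : Nat) : Int) := by push_cast; ring
        rw [List.foldl_cons, this, ih (i + 1) (hcStep s st (i : Int)) (by omega)]
      · rw [PySem.List.pyRange_one_eq_nil (by omega), hcARun_stop s limit i st (by omega)]
        rfl

-- One step of A at an index where we know the marker tests.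
theorem hcStep_cast (s : List Char) (st : List Char × Bool) (i : Nat) :
    hcStep s st (i : Int) =
      (let st1 := if st.2 then (st.1 ++ (s[i]?).toList, st.2) else st
       let st2 := if "do()".toList <+: s.drop i then (st1.1, true) else st1
       if "don't()".toList <+: s.drop i then (st2.1, false) else st2) := by
  have h4 : ((i : Int) + 4) = ((i + 4 : Nat) : Int) := by push_cast; ring
  have h7 : ((i : Int) + 7) = ((i + 7 : Nat) : Int) := by push_cast; ring
  have e4 : (PySem.List.slice s (some (i : Int)) (some ((i : Int) + 4)) = "do()".toList) ↔
      "do()".toList <+: s.drop i := by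
    rw [h4, PySem.List.slice_natCast]
    rw [List.prefix_iff_eq_take]
    constructor <;> intro hx <;> simp_all <;> omega
  have e7 : (PySem.List.slice s (some (i : Int)) (some ((i : Int) + 7)) = "don't()".toList) ↔
      "don't()".toList <+: s.drop i := by
    rw [h7, PySem.List.slice_natCast]
    rw [List.prefix_iff_eq_take]
    constructor <;> intro hx <;> simp_all <;> omega
  simp only [hcStep, PySem.List.pyGet?_natCast]
  rw [if_congr e4 rfl rfl, if_congr e7 rfl rfl]

-- Enabled phase: while no "don't()" starts in [i, i+k), A copies the characters one by one.
theorem hcPhaseT (s : List Char) (limit : Nat) (hs : limit ≤ s.length) :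
    ∀ k i acc, i + k ≤ limit →
      (∀ p, i ≤ p → p < i + k → ¬ "don't()".toList <+: s.drop p) →
      hcARun s limit i (acc, true) = hcARun s limit (i + k) (acc ++ (s.drop i).take k, true) := by
  intro k
  induction k with
  | zero => intro i acc _ _; simp
  | succ n ih =>
      intro i acc hk hnd
      have hi : i < limit := by omega
      have hil : i < s.length := by omega
      conv_lhs => unfold hcARun
      rw [if_pos hi, hcStep_cast]
      have hnd0 : ¬ "don't()".toList <+: s.drop i := hnd i (le_refl i) (by omega)
      simp only [List.getElem?_eq_getElem hil, Option.toList_some, if_true, ite_self,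
        hnd0, if_false]
      rw [ih (i + 1) (acc ++ [s[i]]) (by omega) (fun p hp1 hp2 => hnd p (by omega) (by omega))]
      have : acc ++ [s[i]] ++ (s.drop (i + 1)).take n = acc ++ (s.drop i).take (n + 1) := by
        rw [List.drop_eq_getElem_cons hil, List.take_succ_cons, List.append_assoc]
        rfl
      rw [this, show i + 1 + n = i + (n + 1) by omega]

-- Disabled phase: while no "do()" starts in [i, i+k), A changes nothing.
theorem hcPhaseF (s : List Char) (limit : Nat) (hs : limit ≤ s.length) :
    ∀ k i acc, i + k ≤ limit →
      (∀ p, i ≤ p → p < i + k → ¬ "do()".toList <+: s.drop p) →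
      hcARun s limit i (acc, false) = hcARun s limit (i + k) (acc, false) := by
  intro k
  induction k with
  | zero => intro i acc _ _; simp
  | succ n ih =>
      intro i acc hk hnd
      have hi : i < limit := by omega
      conv_lhs => unfold hcARun
      rw [if_pos hi, hcStep_cast]
      have hnd0 : ¬ "do()".toList <+: s.drop i := hnd i (le_refl i) (by omega)
      simp only [hnd0, if_false, Bool.false_eq_true, ite_self]
      rw [ih (i + 1) acc (by omega) (fun p hp1 hp2 => hnd p (by omega) (by omega))]
      rw [show i + 1 + n = i + (n + 1) by omega]

-- No "don't()" can start where "do()" starts (they differ at their third character).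
theorem hcNotBoth (l : List Char) (h : "do()".toList <+: l) : ¬ "don't()".toList <+: l := by
  intro h2
  rcases List.prefix_or_prefix_of_prefix h h2 with hp | hp
  · have := List.IsPrefix.getElem hp (i := 2) (by decide)
    simp at this
  · have := hp.length_le
    simp at this

theorem hcNotBoth' (l : List Char) (h : "don't()".toList <+: l) : ¬ "do()".toList <+: l :=
  fun h2 => hcNotBoth l h2 h

-- prefix somewhere in the tail ⇒ infix of the tail we searched
theorem hcInfix (s sub : List Char) (i p : Nat) (hip : i ≤ p) (h : sub <+: s.drop p) :
    sub <:+: s.drop i := by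
  rw [List.infix_iff_prefix_suffix]
  refine ⟨s.drop p, h, ?_⟩
  have hdd : (s.drop i).drop (p - i) = s.drop p := by
    rw [List.drop_drop]; congr 1; omega
  rw [← hdd]
  exact List.drop_suffix _ _

-- In the bail-out case of either branch there is no occurrence before `limit`.
theorem hcNone (s sub : List Char) (limit i : Nat) (hs : limit ≤ s.length) (hi : i < limit)
    (hj : PySem.Chars.findFrom s sub (i : Int) = -1 ∨ (limit : Int) ≤ PySem.Chars.findFrom s sub (i : Int)) :
    ∀ p, i ≤ p → p < limit → ¬ sub <+: s.drop p := by
  intro p hp1 hp2 hpre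
  have hk : i ≤ s.length := by omega
  rcases hj with hj | hj
  · exact ((PySem.Chars.findFrom_natCast_eq_neg_one_iff s sub i hk).mp hj) (hcInfix s sub i p hp1 hpre)
  · have hne : PySem.Chars.findFrom s sub (i : Int) ≠ -1 := by omega
    have hspec := PySem.Chars.findFrom_natCast_spec s sub i hk hne
    exact hspec.2.2 p hp1 (by omega) hpre

-- Main invariant: A's loop from any state equals B's jump loop.
theorem hcMain (s : List Char) (limit : Nat) (hs : limit ≤ s.length) :
    ∀ fuel i en acc, limit - i ≤ fuel →
      (hcARun s limit i (acc, en)).1 = hcAltLoop s limit hs i en acc := by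
  intro fuel
  induction fuel with
  | zero =>
      intro i en acc h
      rw [hcARun_stop s limit i _ (by omega)]
      unfold hcAltLoop
      rw [dif_neg (by omega)]
  | succ n ih =>
      intro i en acc h
      by_cases hi : i < limit
      · cases en with
        | true =>
            unfold hcAltLoop
            rw [dif_pos hi, if_pos rfl]
            by_cases hj : PySem.Chars.findFrom s "don't()".toList (i : Int) = -1 ∨
                (limit : Int) ≤ PySem.Chars.findFrom s "don't()".toList (i : Int)
            · rw [dif_pos hj]
              have hnone := hcNone s "don't()".toList limit i hs hi hj
              rw [hcPhaseT s limit hs (limit - i) i acc (by omega)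
                    (fun p hp1 hp2 => hnone p hp1 (by omega)),
                  show i + (limit - i) = limit by omega, hcARun_stop s limit limit _ (le_refl _)]
              rw [PySem.List.slice_natCast]
            · rw [dif_neg hj]
              push_neg at hj
              set j := PySem.Chars.findFrom s "don't()".toList (i : Int) with hjdef
              have hk : i ≤ s.length := by omega
              have hspec := PySem.Chars.findFrom_natCast_spec s "don't()".toList i hk hj.1
              have hij : (i : Int) ≤ j := hspec.1
              have hjl : j.toNat < limit := by omega
              have hpre : "don't()".toList <+: s.drop j.toNat := hspec.2.1
              -- copy [i, j.toNat) enabled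
              rw [hcPhaseT s limit hs (j.toNat - i) i acc (by omega)
                    (fun p hp1 hp2 => hspec.2.2 p hp1 (by omega)),
                  show i + (j.toNat - i) = j.toNat by omega]
              -- one step at j.toNat: append the char, disable
              conv_lhs => unfold hcARun
              rw [if_pos hjl, hcStep_cast]
              have hjs : j.toNat < s.length := by omega
              simp only [List.getElem?_eq_getElem hjs, Option.toList_some, hpre, if_true,
                ite_self, hcNotBoth' _ hpre, if_false]
              rw [ih (j.toNat + 1) false _ (by omega)]
              congr 1
              have hj1 : j + 1 = ((j.toNat + 1 : Nat) : Int) := by omega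
              rw [hj1, PySem.List.slice_natCast, List.append_assoc]
              congr 1
              rw [show j.toNat + 1 - i = (j.toNat - i) + 1 by omega, List.take_succ]
              congr 1
              rw [List.getElem?_drop, show i + (j.toNat - i) = j.toNat by omega,
                List.getElem?_eq_getElem hjs]
              rfl
        | false =>
            unfold hcAltLoop
            rw [dif_pos hi, if_neg (by simp)]
            by_cases hj : PySem.Chars.findFrom s "do()".toList (i : Int) = -1 ∨
                (limit : Int) ≤ PySem.Chars.findFrom s "do()".toList (i : Int)
            · rw [dif_pos hj]
              have hnone := hcNone s "do()".toList limit i hs hi hj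
              rw [hcPhaseF s limit hs (limit - i) i acc (by omega)
                    (fun p hp1 hp2 => hnone p hp1 (by omega)),
                  show i + (limit - i) = limit by omega, hcARun_stop s limit limit _ (le_refl _)]
            · rw [dif_neg hj]
              push_neg at hj
              set j := PySem.Chars.findFrom s "do()".toList (i : Int) with hjdef
              have hk : i ≤ s.length := by omega
              have hspec := PySem.Chars.findFrom_natCast_spec s "do()".toList i hk hj.1
              have hij : (i : Int) ≤ j := hspec.1
              have hjl : j.toNat < limit := by omega
              have hpre : "do()".toList <+: s.drop j.toNat := hspec.2.1
              rw [hcPhaseF s limit hs (j.toNat - i) i acc (by omega)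
                    (fun p hp1 hp2 => hspec.2.2 p hp1 (by omega)),
                  show i + (j.toNat - i) = j.toNat by omega]
              conv_lhs => unfold hcARun
              rw [if_pos hjl, hcStep_cast]
              simp only [hpre, if_true, hcNotBoth _ hpre, if_false, Bool.false_eq_true]
              exact ih (j.toNat + 1) true acc (by omega)
      · rw [hcARun_stop s limit i _ (by omega)]
        unfold hcAltLoop
        rw [dif_neg hi]

-- ===== VERDICT (by name: the statement is the Claim_ definition above) =====
theorem handle_conditionals_spec : Claim_equal_handle_conditionals := by
  intro data _
  show handle_conditionals data = handle_conditionals_alt data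
  by_cases hlen : ((data.toList.length : Int) - 7) ≤ 0
  · have hA : handle_conditionals data =
        String.ofList (((PySem.List.pyRange 0 ((data.toList.length : Int) - 7) 1).foldl
          (hcStep data.toList) ([], true)).1) := rfl
    have hB : handle_conditionals_alt data = "" := by
      unfold handle_conditionals_alt
      rw [if_pos hlen]
    rw [hA, hB, PySem.List.pyRange_one_eq_nil (by omega)]
    rfl
  · have hs : ((data.toList.length : Int) - 7).toNat ≤ data.toList.length := by omega
    have hB : handle_conditionals_alt data =
        String.ofList (hcAltLoop data.toList ((data.toList.length : Int) - 7).toNat hs 0 true []) := by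
      unfold handle_conditionals_alt
      rw [if_neg hlen]
    have hA : handle_conditionals data =
        String.ofList (((PySem.List.pyRange 0 ((data.toList.length : Int) - 7) 1).foldl
          (hcStep data.toList) ([], true)).1) := rfl
    rw [show ((data.toList.length : Int) - 7) =
          ((((data.toList.length : Int) - 7).toNat : Nat) : Int) from by omega] at hA
    rw [show (0 : Int) = ((0 : Nat) : Int) from by norm_num] at hA
    rw [hA, hB,
      hcBridge data.toList ((data.toList.length : Int) - 7).toNat
        ((data.toList.length : Int) - 7).toNat 0 ([], true) (by omega),
      hcMain data.toList ((data.toList.length : Int) - 7).toNat hs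
        ((data.toList.length : Int) - 7).toNat 0 true [] (by omega)]
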